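-- pv_equiv track=rewrite | github.com/riordan34/Python_Course | wk5_practice.py | findNextLocation
-- ===== SOURCE A (Python) =====
-- def findNextLocation(a,n):
--     #take 2D list (a) and number (n) and find it's [row][col]
--     rowIndex = 0 #arbitrary initial assignemnts
--     colIndex = 0
--     rows = range(len(a)) #get rows
--     cols = range(len(a[0])) #get columns, assume square 2D list
--     for row in rows:
--         for col in cols:
--             if a[row][col] == n: #if cell contians n
--                 rowIndex = row #set indeces to current row and col and return
--                 colIndex = col
--                 break
--     return (rowIndex,colIndex)
-- ===== SOURCE B (Python) =====
-- def findNextLocation(a, n):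
--     # scan rows from the bottom; report the first row containing n, leftmost column
--     for r in range(len(a) - 1, -1, -1):
--         if n in a[r]:
--             return (r, a[r].index(n))
--     return (0, 0)
-- ===== Notes on version B (the rewrite author's own statement) =====
-- stated objective: simpler
-- what changed: Replaces A's full overwriting double loop (which scans len(a[0]) columns of every row and keeps the last matching row) by a bottom-up early-return scan using `in`/`.index` per row; Pre_ excludes exactly the inputs on which A raises IndexError (empty grid, or a row shorter than len(a[0]) without n).
-- intended difference: On ragged grids where the bottom-most row containing n holds it only beyond column len(a[0]), A misses it and returns an earlier match or the default (0,0), while B returns n's true location — the intended answer, since n is genuinely in the grid. — e.g. on findNextLocation([[1], [2, 3]], 3): A returns (0, 0), B returns (1, 1)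
import Mathlib
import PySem

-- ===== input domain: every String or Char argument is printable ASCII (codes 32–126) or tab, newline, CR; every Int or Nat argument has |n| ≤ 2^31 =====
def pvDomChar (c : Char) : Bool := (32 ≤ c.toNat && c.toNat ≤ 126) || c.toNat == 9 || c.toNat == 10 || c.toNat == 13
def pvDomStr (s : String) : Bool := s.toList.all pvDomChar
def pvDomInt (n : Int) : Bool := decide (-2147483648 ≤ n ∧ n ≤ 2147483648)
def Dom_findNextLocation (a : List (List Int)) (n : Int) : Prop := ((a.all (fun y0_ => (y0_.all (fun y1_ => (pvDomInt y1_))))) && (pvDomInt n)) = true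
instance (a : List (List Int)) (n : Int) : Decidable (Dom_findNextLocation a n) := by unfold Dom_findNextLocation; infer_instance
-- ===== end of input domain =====

-- B replaces A's overwriting double loop by a bottom-up early-return row scan (objective:
-- simpler; same cost); on ragged grids where A's len(a[0])-column scan misses the bottom-most
-- occurrence of n, B returns the true location (stated as an intended difference D_ below).

-- ===== PORT A =====
-- inner 'for col in cols: if a[row][col] == n: … break' — returns the first matching col.
-- a[row][col] is ported as pyGet? on (a[row] defaulting to []); Pre_ excludes the inputs where Python would raise IndexError.
def pvInnerA (row : List Int) (n : Int) : List Int → Option Int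
  | [] => none
  | c :: rest => if PySem.List.pyGet? row c = some n then some c else pvInnerA row n rest

def findNextLocation (a : List (List Int)) (n : Int) : Int × Int :=
  let rows := PySem.List.pyRange 0 (a.length : Int) 1
  let cols := PySem.List.pyRange 0 (a.headI.length : Int) 1   -- len(a[0]); Pre_ excludes a = []
  rows.foldl (fun st row =>
    match pvInnerA ((PySem.List.pyGet? a row).getD []) n cols with
    | some c => (row, c)
    | none => st) (0, 0)

-- ===== PORT B =====
-- 'for r in range(len(a)-1, -1, -1): if n in a[r]: return (r, a[r].index(n))'
def pvScanB (a : List (List Int)) (n : Int) : List Int → Int × Int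
  | [] => (0, 0)
  | r :: rest =>
    let row := (PySem.List.pyGet? a r).getD []
    match PySem.List.index? row n with
    | some j => (r, (j : Int))
    | none => pvScanB a n rest

def findNextLocation_alt (a : List (List Int)) (n : Int) : Int × Int :=
  pvScanB a n (PySem.List.pyRange ((a.length : Int) - 1) (-1) (-1))

-- ===== PRECONDITION & SPEC =====
-- Pre_ excludes exactly the inputs on which A raises IndexError: the empty grid (a[0]), and
-- ragged grids with a row shorter than len(a[0]) not containing n (A indexes past its end).
def Pre_findNextLocation (a : List (List Int)) (n : Int) : Prop :=
  a ≠ [] ∧ ∀ row ∈ a, a.headI.length ≤ row.length ∨ n ∈ row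
instance (a : List (List Int)) (n : Int) : Decidable (Pre_findNextLocation a n) := by
  unfold Pre_findNextLocation; infer_instance
def pvWitness_findNextLocation : List (List Int) × Int := ([[1, 2], [3, 4]], 3)

-- On ragged grids where the bottom-most row containing n holds it only beyond column len(a[0]),
-- A (which scans just len(a[0]) columns of every row) misses it and returns an earlier match or
-- the default (0,0), while B returns the true location of n — the intended answer, since n is
-- genuinely in the grid.
def D_findNextLocation (a : List (List Int)) (n : Int) : Prop :=
  ∃ i < a.length, n ∈ a.getD i [] ∧ n ∉ (a.getD i []).take a.headI.length ∧
    ∀ j < a.length, i < j → n ∉ a.getD j []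
instance (a : List (List Int)) (n : Int) : Decidable (D_findNextLocation a n) := by
  unfold D_findNextLocation; infer_instance

def Spec_findNextLocation (a : List (List Int)) (n : Int) (out : Int × Int) : Prop := ¬ D_findNextLocation a n → out = findNextLocation_alt a n
instance (a : List (List Int)) (n : Int) (out : Int × Int) : Decidable (Spec_findNextLocation a n out) := by unfold Spec_findNextLocation; infer_instance

def pvDiffWitness_findNextLocation : List (List Int) × Int := ([[1], [2, 3]], 3)
def pvDiffWitnessOut_findNextLocation : (Int × Int) × (Int × Int) := ((0, 0), (1, 1))

-- ===== CLAIM (what is proved, stated in full; the proofs are below) =====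
def Claim_unchanged_findNextLocation : Prop := ∀ (a : List (List Int)) (n : Int), Dom_findNextLocation a n → Pre_findNextLocation a n → Spec_findNextLocation a n (findNextLocation a n)
def Claim_changed_findNextLocation : Prop := Dom_findNextLocation (pvDiffWitness_findNextLocation.1) (pvDiffWitness_findNextLocation.2) ∧ Pre_findNextLocation (pvDiffWitness_findNextLocation.1) (pvDiffWitness_findNextLocation.2) ∧ D_findNextLocation (pvDiffWitness_findNextLocation.1) (pvDiffWitness_findNextLocation.2) ∧ findNextLocation (pvDiffWitness_findNextLocation.1) (pvDiffWitness_findNextLocation.2) = pvDiffWitnessOut_findNextLocation.1 ∧ findNextLocation_alt (pvDiffWitness_findNextLocation.1) (pvDiffWitness_findNextLocation.2) = pvDiffWitnessOut_findNextLocation.2 ∧ pvDiffWitnessOut_findNextLocation.1 ≠ pvDiffWitnessOut_findNextLocation.2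
def Claim_exact_findNextLocation : Prop := ∀ (a : List (List Int)) (n : Int), Dom_findNextLocation a n → Pre_findNextLocation a n → D_findNextLocation a n → findNextLocation a n ≠ findNextLocation_alt a n

-- ===== LEMMAS AND PROOFS =====

-- generic bottom-up early-return scan, per-row result f r
def pvScanF (f : Int → Option Int) : List Int → Int × Int
  | [] => (0, 0)
  | r :: rest => match f r with
    | some c => (r, c)
    | none => pvScanF f rest

-- A's inner column loop over range(m) equals .index on the m-prefix of the row
lemma pvInnerA_append (row : List Int) (n : Int) (l1 l2 : List Int) :
    pvInnerA row n (l1 ++ l2) = (pvInnerA row n l1).orElse (fun _ => pvInnerA row n l2) := by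
  induction l1 with
  | nil => simp [pvInnerA]
  | cons c rest ih =>
    simp only [List.cons_append, pvInnerA]
    split_ifs <;> simp [ih]

lemma pvInnerA_eq_index (row : List Int) (n : Int) (m : Nat) :
    pvInnerA row n (PySem.List.pyRange 0 (m : Int) 1)
      = (PySem.List.index? (row.take m) n).map (fun j => (j : Int)) := by
  induction m with
  | zero =>
    rw [PySem.List.pyRange_one_eq_nil (by omega)]
    simp [pvInnerA, PySem.List.index?_eq_idxOf?]
  | succ m ih =>
    have hsplit : PySem.List.pyRange 0 ((m : Int) + 1) 1
        = PySem.List.pyRange 0 (m : Int) 1 ++ [(m : Int)] :=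
      PySem.List.pyRange_one_succ_right (by omega)
    push_cast
    rw [hsplit, pvInnerA_append, ih]
    rcases h : PySem.List.index? (row.take m) n with _ | j
    · -- n ∉ row.take m
      have hnot : n ∉ row.take m := (PySem.List.index?_eq_none_iff _ _).1 h
      simp only [Option.orElse]
      by_cases hm : m < row.length
      · have hget : PySem.List.pyGet? row (m : Int) = some row[m] :=
          PySem.List.pyGet?_ofNat row m hm
        rw [List.take_add_one, List.getElem?_eq_getElem hm]
        simp only [Option.toList_some]
        by_cases heq : row[m] = n
        · subst heq
          rw [PySem.List.index?_append_singleton_self _ _ hnot]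
          simp [pvInnerA, hget, List.length_take, Nat.min_eq_left (Nat.le_of_lt hm)]
        · have : PySem.List.index? (row.take m ++ [row[m]]) n = none := by
            rw [PySem.List.index?_eq_none_iff]
            intro hmem
            rcases List.mem_append.1 hmem with h1 | h1
            · exact hnot h1
            · rw [List.mem_singleton] at h1; exact heq h1.symm
          rw [this]
          simp [pvInnerA, hget, heq]
      · have hge : row.length ≤ m := Nat.le_of_not_lt hm
        have hget : PySem.List.pyGet? row (m : Int) = none := by
          rw [PySem.List.pyGet?_natCast]
          exact List.getElem?_eq_none hge
        have : row.take (m + 1) = row.take m := by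
          rw [List.take_of_length_le hge, List.take_of_length_le (Nat.le_succ_of_le hge)]
        rw [this, h]
        simp [pvInnerA, hget]
    · -- first match at j already inside row.take m
      have hmem : n ∈ row.take m := (PySem.List.index?_isSome_iff _ _).1 (by rw [h]; rfl)
      rw [List.take_add_one]
      rw [PySem.List.index?_append_of_mem _ hmem, h]
      simp

-- foldl over a list with overwrite = bottom-up early-return scan of the reversed list
lemma pvFoldl_eq_scanF (f : Int → Option Int) (l : List Int) :
    l.foldl (fun st r => match f r with | some c => (r, c) | none => st) (0, 0)
      = pvScanF f l.reverse := by
  induction l using List.reverseRecOn with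
  | nil => simp [pvScanF]
  | append_singleton l r ih =>
    rw [List.foldl_append]
    simp only [List.foldl_cons, List.foldl_nil, List.reverse_append, List.reverse_cons,
      List.reverse_nil, List.nil_append, List.cons_append]
    rcases h : f r with _ | c <;> simp [pvScanF, h, ih]

-- B's scan is the generic scan with per-row result .index on the whole row
lemma pvScanB_eq_scanF (a : List (List Int)) (n : Int) (l : List Int) :
    pvScanB a n l
      = pvScanF (fun r => (PySem.List.index? ((PySem.List.pyGet? a r).getD []) n).map
          (fun j => (j : Int))) l := by
  induction l with
  | nil => rfl
  | cons r rest ih =>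
    simp only [pvScanB, pvScanF]
    rcases hi : PySem.List.index? ((PySem.List.pyGet? a r).getD []) n with _ | j
    · simpa [hi] using ih
    · simp

-- an early-return scan skips a prefix of rows with no match
lemma pvScanF_append_none (f : Int → Option Int) (l1 l2 : List Int)
    (h : ∀ r ∈ l1, f r = none) : pvScanF f (l1 ++ l2) = pvScanF f l2 := by
  induction l1 with
  | nil => rfl
  | cons r t ih =>
    simp only [List.cons_append, pvScanF, h r (List.mem_cons_self ..)]
    exact ih (fun x hx => h x (List.mem_cons_of_mem _ hx))

-- one step of the early-return scan
lemma pvScanF_cons_none (f : Int → Option Int) {r : Int} {rest : List Int} (h : f r = none) :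
    pvScanF f (r :: rest) = pvScanF f rest := by simp [pvScanF, h]

lemma pvScanF_cons_some (f : Int → Option Int) {r c : Int} {rest : List Int} (h : f r = some c) :
    pvScanF f (r :: rest) = (r, c) := by simp [pvScanF, h]

-- an early-return scan returns the default or a row index it scanned
lemma pvScanF_fst (f : Int → Option Int) (l : List Int) :
    pvScanF f l = (0, 0) ∨ (pvScanF f l).1 ∈ l := by
  induction l with
  | nil => exact Or.inl rfl
  | cons r t ih =>
    simp only [pvScanF]
    rcases hf : f r with _ | c
    · rcases ih with h | h
      · exact Or.inl h
      · exact Or.inr (List.mem_cons_of_mem _ h)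
    · exact Or.inr (List.mem_cons_self ..)

-- .index on a prefix agrees with .index on the whole row when every occurrence is in the prefix
lemma pvIndex?_take_eq (l : List Int) (n : Int) (m : Nat) (h : n ∈ l → n ∈ l.take m) :
    PySem.List.index? (l.take m) n = PySem.List.index? l n := by
  by_cases hm : n ∈ l
  · conv_rhs => rw [← List.take_append_drop m l]
    rw [PySem.List.index?_append_of_mem _ (h hm)]
  · rw [(PySem.List.index?_eq_none_iff _ _).2 hm,
      (PySem.List.index?_eq_none_iff _ _).2 (fun hx => hm (List.mem_of_mem_take hx))]

lemma pvL_succ (m : Nat) :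
    (PySem.List.pyRange 0 ((m : Int) + 1) 1).reverse
      = (m : Int) :: (PySem.List.pyRange 0 (m : Int) 1).reverse := by
  rw [PySem.List.pyRange_one_succ_right (by omega)]
  simp

-- the two scans agree down to row m when no bottom-most occurrence of n escapes the prefix
lemma pvMain (a : List (List Int)) (n : Int) (m : Nat) (hm : m ≤ a.length)
    (h : ∀ i < m, n ∈ a.getD i [] → n ∉ (a.getD i []).take a.headI.length →
        ∃ j, j < m ∧ i < j ∧ n ∈ a.getD j []) :
    pvScanF (fun r => (PySem.List.index? (((PySem.List.pyGet? a r).getD []).take a.headI.length) n).map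
        (fun j => (j : Int))) ((PySem.List.pyRange 0 (m : Int) 1).reverse)
      = pvScanF (fun r => (PySem.List.index? ((PySem.List.pyGet? a r).getD []) n).map
        (fun j => (j : Int))) ((PySem.List.pyRange 0 (m : Int) 1).reverse) := by
  induction m with
  | zero =>
    rw [PySem.List.pyRange_one_eq_nil (by omega)]
    rfl
  | succ m ih =>
    have hcast : ((m + 1 : Nat) : Int) = (m : Int) + 1 := by push_cast; ring
    rw [hcast, pvL_succ]
    have hmlt : m < a.length := hm
    have hget : PySem.List.pyGet? a (m : Int) = some a[m] := PySem.List.pyGet?_ofNat a m hmlt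
    have hrow : (PySem.List.pyGet? a (m : Int)).getD [] = a.getD m [] := by
      rw [hget, List.getD_eq_getElem?_getD, List.getElem?_eq_getElem hmlt]
    by_cases hmem : n ∈ a.getD m []
    · -- head matches: D's negation forces the match into the prefix
      have htake : n ∈ (a.getD m []).take a.headI.length := by
        by_contra hnt
        obtain ⟨j, hj, hmj, -⟩ := h m (Nat.lt_succ_self m) hmem hnt
        omega
      have heq : PySem.List.index? ((a.getD m []).take a.headI.length) n
          = PySem.List.index? (a.getD m []) n :=
        pvIndex?_take_eq _ n _ (fun _ => htake)
      rcases hidx : PySem.List.index? (a.getD m []) n with _ | j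
      · exact absurd hmem ((PySem.List.index?_eq_none_iff _ _).1 hidx)
      · simp only [pvScanF, hrow, heq, hidx]
        simp
    · -- head mismatches in both scans; recurse
      have hnone : PySem.List.index? (a.getD m []) n = none :=
        (PySem.List.index?_eq_none_iff _ _).2 hmem
      have hnoneT : PySem.List.index? ((a.getD m []).take a.headI.length) n = none :=
        (PySem.List.index?_eq_none_iff _ _).2 (fun hx => hmem (List.mem_of_mem_take hx))
      simp only [pvScanF, hrow, hnone, hnoneT]
      exact ih (Nat.le_of_lt hm) (fun i hi hin hnt => by
        obtain ⟨j, hj, hij, hjn⟩ := h i (by omega) hin hnt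
        have : j ≠ m := fun hjm => hmem (hjm ▸ hjn)
        exact ⟨j, by omega, hij, hjn⟩)

-- ===== VERDICT (by name: the statement is the Claim_ definition above) =====
theorem findNextLocation_spec : Claim_unchanged_findNextLocation := by
  intro a n _ _ hnd
  unfold D_findNextLocation at hnd
  push Not at hnd
  unfold findNextLocation findNextLocation_alt
  have hrev : PySem.List.pyRange ((a.length : Int) - 1) (-1) (-1)
      = (PySem.List.pyRange 0 (a.length : Int) 1).reverse := by
    rw [PySem.List.pyRange_neg_one_eq_reverse]
    norm_num
  rw [hrev, pvFoldl_eq_scanF, pvScanB_eq_scanF]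
  have hA : ∀ r : Int, pvInnerA ((PySem.List.pyGet? a r).getD []) n
      (PySem.List.pyRange 0 (a.headI.length : Int) 1)
      = (PySem.List.index? (((PySem.List.pyGet? a r).getD []).take a.headI.length) n).map
        (fun j => (j : Int)) := fun r => pvInnerA_eq_index _ n _
  simp only [hA]
  exact pvMain a n a.length le_rfl hnd

theorem findNextLocation_changed : Claim_changed_findNextLocation := by
  unfold Claim_changed_findNextLocation; decide

theorem findNextLocation_tight : Claim_exact_findNextLocation := by
  intro a n _ _ hd
  obtain ⟨i, hi, hmem, hntake, hlast⟩ := hd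
  have hhead : a.getD 0 [] = a.headI := by
    cases a with
    | nil => simp at hi
    | cons x t => rfl
  have hi1 : 1 ≤ i := by
    by_contra h0
    have hz : i = 0 := by omega
    subst hz
    rw [hhead] at hmem hntake
    exact hntake (by simpa using hmem)
  unfold findNextLocation findNextLocation_alt
  have hrev : PySem.List.pyRange ((a.length : Int) - 1) (-1) (-1)
      = (PySem.List.pyRange 0 (a.length : Int) 1).reverse := by
    rw [PySem.List.pyRange_neg_one_eq_reverse]
    norm_num
  rw [hrev, pvFoldl_eq_scanF, pvScanB_eq_scanF]
  have hA : ∀ r : Int, pvInnerA ((PySem.List.pyGet? a r).getD []) n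
      (PySem.List.pyRange 0 (a.headI.length : Int) 1)
      = (PySem.List.index? (((PySem.List.pyGet? a r).getD []).take a.headI.length) n).map
        (fun j => (j : Int)) := fun r => pvInnerA_eq_index _ n _
  simp only [hA]
  have hsplit : PySem.List.pyRange 0 (a.length : Int) 1
      = PySem.List.pyRange 0 ((i : Int) + 1) 1
        ++ PySem.List.pyRange ((i : Int) + 1) (a.length : Int) 1 :=
    PySem.List.pyRange_one_append _ _ _ (by omega) (by exact_mod_cast hi)
  rw [hsplit, List.reverse_append]
  have hrowOf : ∀ j : Nat, j < a.length → (PySem.List.pyGet? a (j : Int)).getD [] = a.getD j [] := by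
    intro j hj
    rw [PySem.List.pyGet?_ofNat a j hj, List.getD_eq_getElem?_getD, List.getElem?_eq_getElem hj]
  have hupper : ∀ r ∈ (PySem.List.pyRange ((i : Int) + 1) (a.length : Int) 1).reverse,
      n ∉ (PySem.List.pyGet? a r).getD [] := by
    intro r hr
    rw [List.mem_reverse, PySem.List.mem_pyRange_one] at hr
    obtain ⟨j, hjlen, hij, rfl⟩ : ∃ j : Nat, j < a.length ∧ i < j ∧ r = (j : Int) :=
      ⟨r.toNat, by omega, by omega, by omega⟩
    rw [hrowOf j hjlen]
    exact hlast j hjlen hij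
  have hnA : ∀ r ∈ (PySem.List.pyRange ((i : Int) + 1) (a.length : Int) 1).reverse,
      (PySem.List.index? (((PySem.List.pyGet? a r).getD []).take a.headI.length) n).map
        (fun j => (j : Int)) = none := fun r hr => by
    rw [(PySem.List.index?_eq_none_iff _ _).2 (fun hx => hupper r hr (List.mem_of_mem_take hx))]
    rfl
  have hnB : ∀ r ∈ (PySem.List.pyRange ((i : Int) + 1) (a.length : Int) 1).reverse,
      (PySem.List.index? ((PySem.List.pyGet? a r).getD []) n).map
        (fun j => (j : Int)) = none := fun r hr => by
    rw [(PySem.List.index?_eq_none_iff _ _).2 (hupper r hr)]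
    rfl
  rw [pvScanF_append_none _ _ _ hnA, pvScanF_append_none _ _ _ hnB, pvL_succ i]
  have hrowi := hrowOf i hi
  have hAnone : PySem.List.index? (((PySem.List.pyGet? a (i : Int)).getD []).take a.headI.length) n
      = none := by
    rw [hrowi]
    exact (PySem.List.index?_eq_none_iff _ _).2 hntake
  rcases hBidx : PySem.List.index? ((PySem.List.pyGet? a (i : Int)).getD []) n with _ | j0
  · rw [hrowi] at hBidx
    exact absurd hmem ((PySem.List.index?_eq_none_iff _ _).1 hBidx)
  · rw [pvScanF_cons_none (fun r =>
        (PySem.List.index? (((PySem.List.pyGet? a r).getD []).take a.headI.length) n).map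
          (fun j => (j : Int)))
        (by show (PySem.List.index? (((PySem.List.pyGet? a (i : Int)).getD []).take
              a.headI.length) n).map (fun j => (j : Int)) = none
            rw [hAnone]; rfl),
        pvScanF_cons_some (fun r =>
        (PySem.List.index? ((PySem.List.pyGet? a r).getD []) n).map
          (fun j => (j : Int)))
        (by show (PySem.List.index? ((PySem.List.pyGet? a (i : Int)).getD []) n).map
              (fun j => (j : Int)) = some ((j0 : Nat) : Int)
            rw [hBidx]; rfl)]
    intro hcontra
    rcases pvScanF_fst (fun r =>
        (PySem.List.index? (((PySem.List.pyGet? a r).getD []).take a.headI.length) n).map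
          (fun j => (j : Int))) ((PySem.List.pyRange 0 (i : Int) 1).reverse) with h0 | hmemf
    · rw [h0] at hcontra
      have : (0 : Int) = (i : Int) := congrArg Prod.fst hcontra
      omega
    · rw [hcontra] at hmemf
      rw [List.mem_reverse, PySem.List.mem_pyRange_one] at hmemf
      omega
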